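-- pv_equiv track=rewrite | github.com/SevenPok/Proyecto_1_LF | Metodos.py | destino
-- ===== SOURCE A (Python) =====
-- def destino(cadena,lista,fila,columna):
--     estado = 0
--     n = fila
--     m = columna
--     for caracter in cadena:
--         if estado == 0:
--             if caracter == '[':
--                 estado = 1
--             else:
--                 break
--         elif estado == 1:
--             if n > 0 and m > 0 and (caracter in lista or caracter == '-'):
--                 estado = 2
--                 m = m - 1
--             else:
--                 break
--         elif estado == 2:
--             if caracter == ',' and n > 0 and m > 0:
--                 estado = 1
--             elif caracter == ';' and n > 0 and m == 0:
--                 estado = 1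
--                 m = columna
--                 n = n - 1
--             elif caracter == ']' and n == 1 and m == 0:
--                 estado = 3
--             else:
--                 break
--         else:
--             break
--     if estado == 3:
--         return True
--     else:
--         return False
-- ===== SOURCE B (Python) =====
-- def destino(cadena, lista, fila, columna):
--     if fila <= 0 or columna <= 0:
--         return False
--     if not cadena or cadena[0] != '[':
--         return False
--     i = 1
--     rn = fila
--     while rn > 0:
--         cn = columna
--         while cn > 0:
--             if i >= len(cadena) or (cadena[i] not in lista and cadena[i] != '-'):
--                 return False
--             sep = ',' if cn > 1 else (';' if rn > 1 else ']')
--             if i + 1 >= len(cadena) or cadena[i + 1] != sep: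
--                 return False
--             i += 2
--             cn -= 1
--         rn -= 1
--     return True
-- ===== Notes on version B (the rewrite author's own statement) =====
-- stated objective: alternative
-- what changed: Replaces A's per-character 4-state machine over the whole string with a direct positional parser: nested row/column counting loops that consume one cell and the separator dictated by position (',' / ';' / ']'), with explicit dimension and opening-bracket guards.
import Mathlib
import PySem

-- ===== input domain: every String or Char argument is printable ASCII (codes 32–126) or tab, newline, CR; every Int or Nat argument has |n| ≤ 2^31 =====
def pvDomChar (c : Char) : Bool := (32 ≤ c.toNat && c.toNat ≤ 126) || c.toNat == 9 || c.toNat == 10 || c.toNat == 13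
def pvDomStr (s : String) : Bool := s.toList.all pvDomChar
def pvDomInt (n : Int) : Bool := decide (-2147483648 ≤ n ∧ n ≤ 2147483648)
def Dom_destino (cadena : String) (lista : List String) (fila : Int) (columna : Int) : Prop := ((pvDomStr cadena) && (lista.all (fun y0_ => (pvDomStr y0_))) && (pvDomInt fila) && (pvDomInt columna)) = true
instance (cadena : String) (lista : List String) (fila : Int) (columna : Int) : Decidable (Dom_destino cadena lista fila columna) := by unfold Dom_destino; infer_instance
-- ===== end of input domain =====

-- B is an alternative decomposition: a positional parser with nested row/column loops
-- instead of A's 4-state character machine; same return value everywhere, no speed claim.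

-- ===== PORT A =====
-- literal transliteration of A's for-loop with break: recursion over the char list
-- carrying (estado, n, m); a break returns the current estado.
def destino_loop (lista : List String) (columna : Int) :
    List Char → Int → Int → Int → Int
  | [], estado, _, _ => estado
  | c :: rest, estado, n, m =>
    if estado = 0 then
      if c = '[' then destino_loop lista columna rest 1 n m else estado
    else if estado = 1 then
      if n > 0 ∧ m > 0 ∧ (lista.contains (String.singleton c) ∨ c = '-') then
        destino_loop lista columna rest 2 n (m - 1)
      else estado
    else if estado = 2 then
      if c = ',' ∧ n > 0 ∧ m > 0 then destino_loop lista columna rest 1 n m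
      else if c = ';' ∧ n > 0 ∧ m = 0 then destino_loop lista columna rest 1 (n - 1) columna
      else if c = ']' ∧ n = 1 ∧ m = 0 then destino_loop lista columna rest 3 n m
      else estado
    else estado

def destino (cadena : String) (lista : List String) (fila : Int) (columna : Int) : Bool :=
  decide (destino_loop lista columna cadena.toList 0 fila columna = 3)

-- ===== PORT B =====
-- inner `while cn > 0` loop of Source B: consume one cell character and its positional
-- separator per step; returns the index after the row's cells, or none on failure.
def destino_alt_cells (chars : List Char) (lista : List String) :
    Nat → Nat → Bool → Option Nat
  | i, 0, _ => some i
  | i, cn' + 1, notLast =>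
    match chars[i]? with
    | none => none
    | some ch =>
      if lista.contains (String.singleton ch) ∨ ch = '-' then
        let sep : Char := if cn' > 0 then ',' else if notLast then ';' else ']'
        match chars[i + 1]? with
        | none => none
        | some s => if s = sep then destino_alt_cells chars lista (i + 2) cn' notLast else none
      else none

-- outer `while rn > 0` loop of Source B.
def destino_alt_rows (chars : List Char) (lista : List String) (colN : Nat) :
    Nat → Nat → Bool
  | _, 0 => true
  | i, rn' + 1 =>
    match destino_alt_cells chars lista i colN (decide (rn' > 0)) with
    | none => false
    | some i' => destino_alt_rows chars lista colN i' rn'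

def destino_alt (cadena : String) (lista : List String) (fila : Int) (columna : Int) : Bool :=
  if fila ≤ 0 ∨ columna ≤ 0 then false
  else
    match cadena.toList with
    | [] => false
    | c :: _ =>
      if c = '[' then destino_alt_rows cadena.toList lista columna.toNat 1 fila.toNat
      else false

-- ===== PRECONDITION & SPEC =====
def Spec_destino (cadena : String) (lista : List String) (fila : Int) (columna : Int) (out : Bool) : Prop := out = destino_alt cadena lista fila columna
instance (cadena : String) (lista : List String) (fila : Int) (columna : Int) (out : Bool) : Decidable (Spec_destino cadena lista fila columna out) := by unfold Spec_destino; infer_instance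

-- ===== CLAIM (what is proved, stated in full; the proofs are below) =====
def Claim_equal_destino : Prop := ∀ (cadena : String) (lista : List String) (fila : Int) (columna : Int), Dom_destino cadena lista fila columna → Spec_destino cadena lista fila columna (destino cadena lista fila columna)

-- ===== LEMMAS AND PROOFS =====

-- one-step unfoldings of A's machine at each estado (the estado literal tests reduced)
lemma loop0_cons (lista : List String) (columna : Int) (c : Char) (rest : List Char) (n m : Int) :
    destino_loop lista columna (c :: rest) 0 n m =
      if c = '[' then destino_loop lista columna rest 1 n m else 0 := by
  simp [destino_loop]

lemma loop1_cons (lista : List String) (columna : Int) (c : Char) (rest : List Char) (n m : Int) :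
    destino_loop lista columna (c :: rest) 1 n m =
      if n > 0 ∧ m > 0 ∧ (lista.contains (String.singleton c) ∨ c = '-') then
        destino_loop lista columna rest 2 n (m - 1)
      else 1 := by
  simp [destino_loop]

lemma loop2_cons (lista : List String) (columna : Int) (c : Char) (rest : List Char) (n m : Int) :
    destino_loop lista columna (c :: rest) 2 n m =
      if c = ',' ∧ n > 0 ∧ m > 0 then destino_loop lista columna rest 1 n m
      else if c = ';' ∧ n > 0 ∧ m = 0 then destino_loop lista columna rest 1 (n - 1) columna
      else if c = ']' ∧ n = 1 ∧ m = 0 then destino_loop lista columna rest 3 n m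
      else 2 := by
  simp [destino_loop]

-- once A's machine reaches estado 3 it stays there.
lemma loop_state3 (lista : List String) (columna : Int) (chars : List Char) (n m : Int) :
    destino_loop lista columna chars 3 n m = 3 := by
  cases chars with
  | nil => rfl
  | cons c rest => simp [destino_loop]

-- in estado 1 with a dead row/column budget the machine breaks (or ends) with estado 1.
lemma loop_state1_dead (lista : List String) (columna : Int) (chars : List Char) (n m : Int)
    (h : ¬(n > 0 ∧ m > 0)) : destino_loop lista columna chars 1 n m = 1 := by
  cases chars with
  | nil => rfl
  | cons c rest =>
    rw [loop1_cons, if_neg]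
    rintro ⟨h1, h2, -⟩
    exact h ⟨h1, h2⟩

-- Main correspondence: A's machine started in estado 1 at suffix `chars.drop i`,
-- with n rows (current one included) and m cells of the current row still to read,
-- reaches estado 3 iff B's positional parser accepts from index i.
lemma main_corr (lista : List String) (columna : Int) (chars : List Char)
    (hc : 1 ≤ columna) :
    ∀ fuel : Nat, ∀ i : Nat, ∀ n m : Int, 1 ≤ n → 1 ≤ m →
    chars.length ≤ i + fuel →
    ((destino_loop lista columna (chars.drop i) 1 n m = 3) ↔
      ((destino_alt_cells chars lista i m.toNat (decide (1 < n))).elim false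
        (fun i' => destino_alt_rows chars lista columna.toNat i' (n - 1).toNat)) = true) := by
  intro fuel
  induction fuel using Nat.strong_induction_on with
  | _ fuel IH =>
    intro i n m hn hm hlen
    obtain ⟨k, hk⟩ : ∃ k, m.toNat = k + 1 := ⟨m.toNat - 1, by omega⟩
    by_cases hi : i < chars.length
    · rw [List.drop_eq_getElem_cons hi, loop1_cons, hk]
      simp only [destino_alt_cells, List.getElem?_eq_getElem hi]
      by_cases hmem : lista.contains (String.singleton chars[i]) ∨ chars[i] = '-'
      · rw [if_pos (show n > 0 ∧ m > 0 ∧ (lista.contains (String.singleton chars[i]) ∨ chars[i] = '-')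
            from ⟨by omega, by omega, hmem⟩),
          if_pos (show (lista.contains (String.singleton chars[i]) ∨ chars[i] = '-') from hmem)]
        by_cases hi1 : i + 1 < chars.length
        · rw [List.drop_eq_getElem_cons hi1, show i + 1 + 1 = i + 2 by omega, loop2_cons]
          simp only [List.getElem?_eq_getElem hi1]
          have hfuel2 : fuel - 2 < fuel := by omega
          have hlen2 : chars.length ≤ (i + 2) + (fuel - 2) := by omega
          by_cases hm2 : 2 ≤ m
          · -- more cells remain in this row: the expected separator is ','
            rw [show (if k > 0 then ',' else if decide (1 < n) then ';' else ']') = ','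
              from if_pos (by omega)]
            by_cases hch : chars[i + 1] = ','
            · rw [if_pos (show chars[i + 1] = ',' ∧ n > 0 ∧ m - 1 > 0 from ⟨hch, by omega, by omega⟩),
                if_pos (show chars[i + 1] = ',' from hch)]
              have hrec := IH (fuel - 2) hfuel2 (i + 2) n (m - 1) hn (by omega) hlen2
              rw [show (m - 1).toNat = k by omega] at hrec
              exact hrec
            · rw [if_neg (show ¬(chars[i + 1] = ',' ∧ n > 0 ∧ m - 1 > 0) from by tauto),
                if_neg (show ¬(chars[i + 1] = ';' ∧ n > 0 ∧ m - 1 = 0) from by rintro ⟨-, -, h⟩; omega),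
                if_neg (show ¬(chars[i + 1] = ']' ∧ n = 1 ∧ m - 1 = 0) from by rintro ⟨-, -, h⟩; omega),
                if_neg (show ¬(chars[i + 1] = ',') from hch)]
              simp
          · -- last cell of the row: m = 1
            rw [show (if k > 0 then ',' else if decide (1 < n) then ';' else ']')
                = (if decide (1 < n) then ';' else ']') from if_neg (by omega)]
            by_cases hn2 : 1 < n
            · -- not the last row: the expected separator is ';'
              rw [if_pos (show decide (1 < n) = true from by simpa using hn2)]
              by_cases hch : chars[i + 1] = ';'
              · rw [if_neg (show ¬(chars[i + 1] = ',' ∧ n > 0 ∧ m - 1 > 0) from by rintro ⟨-, -, h⟩; omega),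
                  if_pos (show chars[i + 1] = ';' ∧ n > 0 ∧ m - 1 = 0 from ⟨hch, by omega, by omega⟩),
                  if_pos (show chars[i + 1] = ';' from hch)]
                rw [show k = 0 by omega]
                simp only [destino_alt_cells, Option.elim]
                have hrec := IH (fuel - 2) hfuel2 (i + 2) (n - 1) columna (by omega) hc hlen2
                rw [hrec]
                -- unfold the next row step on the B side
                obtain ⟨r, hr⟩ : ∃ r, (n - 1).toNat = r + 1 := ⟨(n - 1).toNat - 1, by omega⟩
                rw [hr]
                simp only [destino_alt_rows]
                have hd : decide (r > 0) = decide (1 < n - 1) := by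
                  by_cases h : 1 < n - 1
                  · simp [h, show r > 0 by omega]
                  · simp [h, show ¬ r > 0 by omega]
                rw [hd, show (n - 1 - 1).toNat = r by omega]
                cases destino_alt_cells chars lista (i + 2) columna.toNat (decide (1 < n - 1)) with
                | none => simp
                | some i' => simp
              · rw [if_neg (show ¬(chars[i + 1] = ',' ∧ n > 0 ∧ m - 1 > 0) from by rintro ⟨-, -, h⟩; omega),
                  if_neg (show ¬(chars[i + 1] = ';' ∧ n > 0 ∧ m - 1 = 0) from by tauto),
                  if_neg (show ¬(chars[i + 1] = ']' ∧ n = 1 ∧ m - 1 = 0) from by rintro ⟨-, h, -⟩; omega),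
                  if_neg (show ¬(chars[i + 1] = ';') from hch)]
                simp
            · -- last row (n = 1): the expected separator is ']'
              rw [if_neg (show ¬(decide (1 < n) = true) from by simpa using hn2)]
              by_cases hch : chars[i + 1] = ']'
              · rw [if_neg (show ¬(chars[i + 1] = ',' ∧ n > 0 ∧ m - 1 > 0) from by rintro ⟨-, -, h⟩; omega),
                  if_neg (show ¬(chars[i + 1] = ';' ∧ n > 0 ∧ m - 1 = 0) from by
                    rintro ⟨h, -, -⟩; rw [hch] at h; exact absurd h (by decide)),
                  if_pos (show chars[i + 1] = ']' ∧ n = 1 ∧ m - 1 = 0 from ⟨hch, by omega, by omega⟩),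
                  if_pos (show chars[i + 1] = ']' from hch), loop_state3]
                rw [show k = 0 by omega, show (n - 1).toNat = 0 by omega]
                simp [destino_alt_cells, destino_alt_rows]
              · by_cases hch2 : chars[i + 1] = ';'
                · rw [if_neg (show ¬(chars[i + 1] = ',' ∧ n > 0 ∧ m - 1 > 0) from by rintro ⟨-, -, h⟩; omega),
                    if_pos (show chars[i + 1] = ';' ∧ n > 0 ∧ m - 1 = 0 from ⟨hch2, by omega, by omega⟩),
                    if_neg (show ¬(chars[i + 1] = ']') from hch),
                    loop_state1_dead _ _ _ _ _ (by omega)]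
                  simp
                · rw [if_neg (show ¬(chars[i + 1] = ',' ∧ n > 0 ∧ m - 1 > 0) from by rintro ⟨-, -, h⟩; omega),
                    if_neg (show ¬(chars[i + 1] = ';' ∧ n > 0 ∧ m - 1 = 0) from by tauto),
                    if_neg (show ¬(chars[i + 1] = ']' ∧ n = 1 ∧ m - 1 = 0) from by tauto),
                    if_neg (show ¬(chars[i + 1] = ']') from hch)]
                  simp
        · -- string exhausted after the cell character: both sides fail
          rw [List.drop_eq_nil_of_le (show chars.length ≤ i + 1 by omega),
            show chars[i + 1]? = none from by rw [List.getElem?_eq_none_iff]; omega]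
          simp [destino_loop]
      · -- cell character rejected: both sides fail
        rw [if_neg (show ¬(n > 0 ∧ m > 0 ∧ (lista.contains (String.singleton chars[i]) ∨ chars[i] = '-'))
            from by tauto),
          if_neg (show ¬(lista.contains (String.singleton chars[i]) ∨ chars[i] = '-') from hmem)]
        simp
    · -- index past the end of the string: both sides fail
      rw [List.drop_eq_nil_of_le (show chars.length ≤ i by omega), hk]
      simp [destino_loop, destino_alt_cells,
        show chars[i]? = none from by rw [List.getElem?_eq_none_iff]; omega]

-- ===== VERDICT (by name: the statement is the Claim_ definition above) =====
theorem destino_spec : Claim_equal_destino := by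
  intro cadena lista fila columna _
  unfold Spec_destino destino destino_alt
  by_cases hfc : fila ≤ 0 ∨ columna ≤ 0
  · rw [if_pos hfc]
    cases cadena.toList with
    | nil => simp [destino_loop]
    | cons c rest =>
      rw [loop0_cons]
      by_cases hbr : c = '['
      · rw [if_pos hbr, loop_state1_dead _ _ _ _ _ (by omega)]
        simp
      · rw [if_neg hbr]
        simp
  · rw [if_neg hfc]
    have hf : 0 < fila := by omega
    have hcpos : 0 < columna := by omega
    cases hchars : cadena.toList with
    | nil => simp [destino_loop]
    | cons c rest =>
      dsimp only
      by_cases hbr : c = '['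
      · rw [if_pos hbr, loop0_cons, if_pos hbr]
        have hmc := main_corr lista columna (c :: rest) (by omega) (c :: rest).length 1 fila
          columna (by omega) (by omega) (by omega)
        rw [show (c :: rest).drop 1 = rest from rfl] at hmc
        obtain ⟨r, hr⟩ : ∃ r, fila.toNat = r + 1 := ⟨fila.toNat - 1, by omega⟩
        rw [hr]
        simp only [destino_alt_rows]
        have hd : decide (r > 0) = decide (1 < fila) := by
          by_cases h : 1 < fila
          · simp [h, show r > 0 by omega]
          · simp [h, show ¬ r > 0 by omega]
        have hnn : (fila - 1).toNat = r := by omega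
        rw [hd]
        rw [hnn] at hmc
        by_cases hp : destino_loop lista columna rest 1 fila columna = 3
        · rw [hp]
          have := hmc.mp hp
          cases hcells : destino_alt_cells (c :: rest) lista 1 columna.toNat (decide (1 < fila)) with
          | none => rw [hcells] at this; simp at this
          | some i' => rw [hcells] at this; simpa using this
        · rw [decide_eq_false hp]
          cases hcells : destino_alt_cells (c :: rest) lista 1 columna.toNat (decide (1 < fila)) with
          | none => simp
          | some i' =>
            rw [hcells] at hmc
            simp only [Option.elim] at hmc
            cases hrows : destino_alt_rows (c :: rest) lista columna.toNat i' r with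
            | false => exact hrows.symm
            | true => exact absurd (hmc.mpr hrows) hp
      · rw [if_neg hbr, loop0_cons, if_neg hbr]
        simp
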